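-- pv_equiv track=rewrite | github.com/ayanamizuta/cpro | atcoder/arc/arc135/a.py | solve
-- ===== SOURCE A (Python) =====
-- mod = 998244353
--
-- cache = {}
--
-- def solve(n):
--     if n <= 4:
--         return n
--     n2 = n // 2
--     if n2 == (n - n2):
--         if cache.get(n2) is not None:
--             s = cache[n2]
--         else:
--             s = solve(n2)
--             cache[n2] = s % mod
--         return s * s % mod
--     if cache.get(n2) is not None:
--         s = cache[n2]
--     else:
--         s = solve(n2)
--         cache[n2] = s % mod
--     if cache.get(n - n2) is not None:
--         s_ = cache[n - n2]
--     else: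
--         s_ = solve(n - n2)
--         cache[n - n2] = s_ % mod
--     return s * s_ % mod
-- ===== SOURCE B (Python) =====
-- mod = 998244353
--
-- def solve(n):
--     if n <= 4:
--         return n
--     # Two-counter halving: at every level the active values are m and m+1.
--     m, a, b = n, 1, 0
--     while m > 4:
--         if m % 2 == 0:
--             a, b = 2 * a + b, b
--         else:
--             a, b = a, a + 2 * b
--         m //= 2
--     if m == 4 and b:
--         return pow(4, a, mod) * pow(6, b, mod) % mod
--     return pow(m, a, mod) * pow(m + 1, b, mod) % mod
-- ===== Notes on version B (the rewrite author's own statement) =====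
-- stated objective: alternative
-- what changed: Replaces A's memoized depth-first recursion over the halving tree (module-level cache dict) by an iterative loop that tracks the two active values m and m+1 of each level with multiplicity counters and finishes with two modular exponentiations.
import Mathlib
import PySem

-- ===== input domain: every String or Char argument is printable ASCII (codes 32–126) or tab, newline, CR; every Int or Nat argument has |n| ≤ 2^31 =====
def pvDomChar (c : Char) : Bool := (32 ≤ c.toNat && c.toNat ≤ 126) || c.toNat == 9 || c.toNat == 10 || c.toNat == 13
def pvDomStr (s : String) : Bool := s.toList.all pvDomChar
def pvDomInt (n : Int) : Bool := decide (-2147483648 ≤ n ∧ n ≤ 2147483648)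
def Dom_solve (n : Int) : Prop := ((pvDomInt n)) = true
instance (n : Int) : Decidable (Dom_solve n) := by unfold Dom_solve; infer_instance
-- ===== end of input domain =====

-- B replaces A's memoized depth-first recursion over the halving tree by an iterative
-- two-counter level sweep (alternative decomposition); equal return values are proved.
-- A mutates a module-level cache dict; it only ever stores values solve itself returns,
-- so the return value (the subject of this claim) is unaffected; B has no side effects.

def pymod : Int := 998244353

-- ===== PORT A =====
-- transliteration of A's `solve` with the module-level `cache` dict threaded as state
def solveCache (n : Int) (cache : PySem.Dict Int Int) : Int × PySem.Dict Int Int :=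
  if n ≤ 4 then (n, cache)
  else
    let n2 := PySem.Int.floordiv n 2
    if n2 = n - n2 then
      match cache.get? n2 with
      | some s => (PySem.Int.mod (s * s) pymod, cache)
      | none =>
        let p := solveCache n2 cache
        let s := p.1
        let cache := p.2.insert n2 (PySem.Int.mod s pymod)
        (PySem.Int.mod (s * s) pymod, cache)
    else
      let r1 :=
        match cache.get? n2 with
        | some s => (s, cache)
        | none =>
          let p := solveCache n2 cache
          (p.1, p.2.insert n2 (PySem.Int.mod p.1 pymod))
      let s := r1.1
      let r2 :=
        match r1.2.get? (n - n2) with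
        | some s_ => (s_, r1.2)
        | none =>
          let p := solveCache (n - n2) r1.2
          (p.1, p.2.insert (n - n2) (PySem.Int.mod p.1 pymod))
      let s_ := r2.1
      (PySem.Int.mod (s * s_) pymod, r2.2)
termination_by n.toNat
decreasing_by
  all_goals
    simp only [PySem.Int.floordiv_eq_ediv_of_pos (by norm_num : (0:Int) < 2)] at *
    omega

def solve (n : Int) : Int := (solveCache n PySem.Dict.empty).1

-- ===== PORT B =====
-- transliteration of Source B's while-loop: the active values at each level are m and m+1,
-- with multiplicities a and b
def solveLoop (m a b : Int) : Int × Int × Int :=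
  if 4 < m then
    if PySem.Int.mod m 2 = 0 then
      solveLoop (PySem.Int.floordiv m 2) (2 * a + b) b
    else
      solveLoop (PySem.Int.floordiv m 2) a (a + 2 * b)
  else (m, a, b)
termination_by m.toNat
decreasing_by
  all_goals
    simp only [PySem.Int.floordiv_eq_ediv_of_pos (by norm_num : (0:Int) < 2)] at *
    omega

def solve_alt (n : Int) : Int :=
  if n ≤ 4 then n
  else
    let r := solveLoop n 1 0
    let m := r.1
    let a := r.2.1
    let b := r.2.2
    if m = 4 ∧ b ≠ 0 then
      PySem.Int.mod (PySem.Int.powMod 4 a.toNat pymod * PySem.Int.powMod 6 b.toNat pymod) pymod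
    else
      PySem.Int.mod (PySem.Int.powMod m a.toNat pymod * PySem.Int.powMod (m + 1) b.toNat pymod) pymod

-- ===== PRECONDITION & SPEC =====
def Spec_solve (n : Int) (out : Int) : Prop := out = solve_alt n
instance (n : Int) (out : Int) : Decidable (Spec_solve n out) := by unfold Spec_solve; infer_instance

-- ===== CLAIM (what is proved, stated in full; the proofs are below) =====
def Claim_equal_solve : Prop := ∀ (n : Int), Dom_solve n → Spec_solve n (solve n)

-- ===== LEMMAS AND PROOFS =====

theorem pymod_pos : (0:Int) < pymod := by norm_num [pymod]

theorem fd2 (n : Int) : PySem.Int.floordiv n 2 = n / 2 :=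
  PySem.Int.floordiv_eq_ediv_of_pos (by norm_num)

-- cache-free specification of A's recurrence
def gspec (n : Int) : Int :=
  if n ≤ 4 then n
  else PySem.Int.mod (gspec (n / 2) * gspec (n - n / 2)) pymod
termination_by n.toNat
decreasing_by
  all_goals omega

theorem gspec_le4 {n : Int} (h : n ≤ 4) : gspec n = n := by rw [gspec, if_pos h]

theorem gspec_gt4 {n : Int} (h : ¬ n ≤ 4) :
    gspec n = PySem.Int.mod (gspec (n / 2) * gspec (n - n / 2)) pymod := by
  rw [gspec, if_neg h]

theorem gspec_bound (n : Int) (h : 0 ≤ n) : 0 ≤ gspec n ∧ gspec n < pymod := by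
  rw [gspec]
  split
  · exact ⟨h, by unfold pymod; omega⟩
  · exact ⟨PySem.Int.mod_nonneg _ pymod_pos, PySem.Int.mod_lt _ pymod_pos⟩

theorem gspec_emod (n : Int) (h : 0 ≤ n) : gspec n % pymod = gspec n := by
  have hb := gspec_bound n h
  exact Int.emod_eq_of_lt hb.1 hb.2

theorem gspec_mod (n : Int) (h : 0 ≤ n) : PySem.Int.mod (gspec n) pymod = gspec n := by
  rw [PySem.Int.mod_eq_emod_of_pos pymod_pos]; exact gspec_emod n h

def CacheInv (c : PySem.Dict Int Int) : Prop :=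
  ∀ k v, c.get? k = some v → v = gspec k

theorem cacheInv_insert {c : PySem.Dict Int Int} (h : CacheInv c) (k : Int)
    (hk : 0 ≤ k) : CacheInv (c.insert k (PySem.Int.mod (gspec k) pymod)) := by
  intro k' v hv
  rcases eq_or_ne k' k with rfl | hne
  · rw [PySem.Dict.get?_insert_self] at hv
    cases hv
    exact gspec_mod k' hk
  · rw [PySem.Dict.get?_insert_of_ne _ _ hne] at hv
    exact h k' v hv

-- one `cache.get(k) is not None` / recurse-and-store step of A
theorem step_eq (k : Int) (hk : 0 ≤ k) (c : PySem.Dict Int Int)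
    (hrec : CacheInv c → (solveCache k c).1 = gspec k ∧ CacheInv (solveCache k c).2)
    (hc : CacheInv c) :
    (match c.get? k with
      | some s => (s, c)
      | none =>
        let p := solveCache k c
        (p.1, p.2.insert k (PySem.Int.mod p.1 pymod))).1 = gspec k ∧
    CacheInv (match c.get? k with
      | some s => (s, c)
      | none =>
        let p := solveCache k c
        (p.1, p.2.insert k (PySem.Int.mod p.1 pymod))).2 := by
  cases h : c.get? k with
  | some s => exact ⟨hc _ _ h, hc⟩
  | none =>
    obtain ⟨h1, h2⟩ := hrec hc
    refine ⟨h1, ?_⟩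
    show CacheInv ((solveCache k c).2.insert k (PySem.Int.mod (solveCache k c).1 pymod))
    rw [h1]
    exact cacheInv_insert h2 k hk

theorem solveCache_eq : ∀ (n : Int) (c : PySem.Dict Int Int), CacheInv c →
    (solveCache n c).1 = gspec n ∧ CacheInv (solveCache n c).2 := by
  intro n c
  fun_induction solveCache n c with
  | case1 n c hn =>
    intro hc
    exact ⟨(gspec_le4 hn).symm, hc⟩
  | case2 n cache hn n2 heq s hs =>
    intro hc
    refine ⟨?_, hc⟩
    have hse : s = gspec n2 := hc _ _ hs
    have hfd : n2 = n / 2 := fd2 n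
    show PySem.Int.mod (s * s) pymod = gspec n
    rw [gspec, if_neg hn, ← hfd, ← heq, hse]
  | case3 n cache hn n2 heq hs p s cache' ih =>
    intro hc
    obtain ⟨ih1, ih2⟩ := ih hc
    have hn2 : 0 ≤ n2 := by
      have := fd2 n
      show 0 ≤ PySem.Int.floordiv n 2
      omega
    constructor
    · have hse : s = gspec n2 := ih1
      have hfd : n2 = n / 2 := fd2 n
      show PySem.Int.mod (s * s) pymod = gspec n
      rw [gspec, if_neg hn, ← hfd, ← heq, hse]
    · show CacheInv cache'
      have : cache' = (solveCache n2 cache).2.insert n2 (PySem.Int.mod (gspec n2) pymod) := by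
        show (solveCache n2 cache).2.insert n2 (PySem.Int.mod (solveCache n2 cache).1 pymod) = _
        rw [ih1]
      rw [this]
      exact cacheInv_insert ih2 n2 hn2
  | case4 n cache hn n2 hne r1 s r2 s_ ih3 ih2 ih1 =>
    intro hc
    have hfd := fd2 n
    have hn2 : 0 ≤ n2 := by show 0 ≤ PySem.Int.floordiv n 2; omega
    have hn2' : 0 ≤ n - n2 := by show 0 ≤ n - PySem.Int.floordiv n 2; omega
    have h1 := step_eq n2 hn2 cache ih3 hc
    have e1 : s = gspec n2 := h1.1
    have hinv1 : CacheInv r1.2 := h1.2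
    have h2 := step_eq (n - n2) hn2' r1.2 ih1 hinv1
    have e2 : s_ = gspec (n - n2) := h2.1
    have hfd' : n2 = n / 2 := fd2 n
    refine ⟨?_, h2.2⟩
    show PySem.Int.mod (s * s_) pymod = gspec n
    rw [gspec, if_neg hn, ← hfd', e1, e2]

-- B's loop invariant: the two-counter state keeps the leaf product invariant mod pymod
theorem solveLoop_inv : ∀ (m a b : Int), 2 ≤ m → 0 ≤ a → 0 ≤ b →
    2 ≤ (solveLoop m a b).1 ∧ (solveLoop m a b).1 ≤ 4 ∧
    0 ≤ (solveLoop m a b).2.1 ∧ 0 ≤ (solveLoop m a b).2.2 ∧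
    (gspec (solveLoop m a b).1 ^ (solveLoop m a b).2.1.toNat *
      gspec ((solveLoop m a b).1 + 1) ^ (solveLoop m a b).2.2.toNat) % pymod
      = (gspec m ^ a.toNat * gspec (m + 1) ^ b.toNat) % pymod := by
  intro m a b
  fun_induction solveLoop m a b with
  | case1 m a b hm hev ih =>
    intro _ ha hb
    have hfd := fd2 m
    have hdvd : (2:Int) ∣ m := (PySem.Int.mod_eq_zero_iff_dvd m 2).1 hev
    have ht : 2 ≤ m / 2 := by omega
    simp only [fd2] at ih ⊢
    obtain ⟨i1, i2, i3, i4, i5⟩ := ih ht (by omega) hb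
    refine ⟨i1, i2, i3, i4, ?_⟩
    rw [i5]
    have key : (gspec (m / 2) ^ (2 * a + b).toNat * gspec (m / 2 + 1) ^ b.toNat) % pymod
        = (gspec m ^ a.toNat * gspec (m + 1) ^ b.toNat) % pymod := by
      have hgm : Int.ModEq pymod (gspec m) (gspec (m / 2) * gspec (m / 2)) := by
        have := gspec_gt4 (show ¬ m ≤ 4 by omega)
        have hmm : m - m / 2 = m / 2 := by omega
        rw [hmm] at this
        rw [this, PySem.Int.mod_eq_emod_of_pos pymod_pos]
        exact (Int.emod_emod_of_dvd _ dvd_rfl)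
      have hgm1 : Int.ModEq pymod (gspec (m + 1)) (gspec (m / 2) * gspec (m / 2 + 1)) := by
        have := gspec_gt4 (show ¬ m + 1 ≤ 4 by omega)
        have ha2 : (m + 1) / 2 = m / 2 := by omega
        have hb2 : (m + 1) - (m + 1) / 2 = m / 2 + 1 := by omega
        rw [hb2, ha2] at this
        rw [this, PySem.Int.mod_eq_emod_of_pos pymod_pos]
        exact (Int.emod_emod_of_dvd _ dvd_rfl)
      have hexp : (2 * a + b).toNat = 2 * a.toNat + b.toNat := by omega
      have hme : Int.ModEq pymod (gspec m ^ a.toNat * gspec (m + 1) ^ b.toNat)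
          (gspec (m / 2) ^ (2 * a + b).toNat * gspec (m / 2 + 1) ^ b.toNat) := by
        calc gspec m ^ a.toNat * gspec (m + 1) ^ b.toNat
            ≡ (gspec (m / 2) * gspec (m / 2)) ^ a.toNat *
              (gspec (m / 2) * gspec (m / 2 + 1)) ^ b.toNat [ZMOD pymod] :=
              (hgm.pow a.toNat).mul (hgm1.pow b.toNat)
          _ = gspec (m / 2) ^ (2 * a.toNat + b.toNat) * gspec (m / 2 + 1) ^ b.toNat := by ring
          _ = gspec (m / 2) ^ (2 * a + b).toNat * gspec (m / 2 + 1) ^ b.toNat := by rw [hexp]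
      exact hme.symm
    exact key
  | case2 m a b hm hev ih =>
    intro _ ha hb
    have hfd := fd2 m
    have hdvd : ¬ (2:Int) ∣ m := fun h => hev ((PySem.Int.mod_eq_zero_iff_dvd m 2).2 h)
    have ht : 2 ≤ m / 2 := by omega
    simp only [fd2] at ih ⊢
    obtain ⟨i1, i2, i3, i4, i5⟩ := ih ht ha (by omega)
    refine ⟨i1, i2, i3, i4, ?_⟩
    rw [i5]
    have key : (gspec (m / 2) ^ a.toNat * gspec (m / 2 + 1) ^ (a + 2 * b).toNat) % pymod
        = (gspec m ^ a.toNat * gspec (m + 1) ^ b.toNat) % pymod := by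
      have hgm : Int.ModEq pymod (gspec m) (gspec (m / 2) * gspec (m / 2 + 1)) := by
        have := gspec_gt4 (show ¬ m ≤ 4 by omega)
        have hmm : m - m / 2 = m / 2 + 1 := by omega
        rw [hmm] at this
        rw [this, PySem.Int.mod_eq_emod_of_pos pymod_pos]
        exact (Int.emod_emod_of_dvd _ dvd_rfl)
      have hgm1 : Int.ModEq pymod (gspec (m + 1)) (gspec (m / 2 + 1) * gspec (m / 2 + 1)) := by
        have := gspec_gt4 (show ¬ m + 1 ≤ 4 by omega)
        have ha2 : (m + 1) / 2 = m / 2 + 1 := by omega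
        have hb2 : (m + 1) - (m + 1) / 2 = m / 2 + 1 := by omega
        rw [hb2, ha2] at this
        rw [this, PySem.Int.mod_eq_emod_of_pos pymod_pos]
        exact (Int.emod_emod_of_dvd _ dvd_rfl)
      have hexp : (a + 2 * b).toNat = a.toNat + 2 * b.toNat := by omega
      have hme : Int.ModEq pymod (gspec m ^ a.toNat * gspec (m + 1) ^ b.toNat)
          (gspec (m / 2) ^ a.toNat * gspec (m / 2 + 1) ^ (a + 2 * b).toNat) := by
        calc gspec m ^ a.toNat * gspec (m + 1) ^ b.toNat
            ≡ (gspec (m / 2) * gspec (m / 2 + 1)) ^ a.toNat *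
              (gspec (m / 2 + 1) * gspec (m / 2 + 1)) ^ b.toNat [ZMOD pymod] :=
              (hgm.pow a.toNat).mul (hgm1.pow b.toNat)
          _ = gspec (m / 2) ^ a.toNat * gspec (m / 2 + 1) ^ (a.toNat + 2 * b.toNat) := by ring
          _ = gspec (m / 2) ^ a.toNat * gspec (m / 2 + 1) ^ (a + 2 * b).toNat := by rw [hexp]
      exact hme.symm
    exact key
  | case3 m a b hm =>
    intro hm2 ha hb
    exact ⟨hm2, by omega, ha, hb, rfl⟩

theorem gspec_five : gspec 5 = 6 := by
  have h1 : PySem.Int.floordiv 5 2 = 2 := by decide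
  rw [gspec]
  norm_num [h1, gspec_le4, PySem.Int.mod_eq_emod_of_pos pymod_pos, pymod]

-- B's exit formula equals the invariant product for the terminal state
theorem final_eq (m a b : Int) (hm2 : 2 ≤ m) (hm4 : m ≤ 4) (ha : 0 ≤ a) (hb : 0 ≤ b) :
    (if m = 4 ∧ b ≠ 0 then
      PySem.Int.mod (PySem.Int.powMod 4 a.toNat pymod * PySem.Int.powMod 6 b.toNat pymod) pymod
    else
      PySem.Int.mod (PySem.Int.powMod m a.toNat pymod * PySem.Int.powMod (m + 1) b.toNat pymod) pymod)
    = (gspec m ^ a.toNat * gspec (m + 1) ^ b.toNat) % pymod := by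
  simp only [PySem.Int.powMod_eq, PySem.Int.mod_eq_emod_of_pos pymod_pos]
  split
  · rename_i h
    obtain ⟨rfl, -⟩ := h
    have h5 : gspec (4 + 1 : Int) = 6 := by norm_num [gspec_five]
    rw [gspec_le4 (by norm_num : (4:Int) ≤ 4), h5, ← Int.mul_emod]
  · rename_i h
    interval_cases m
    · rw [gspec_le4 (by norm_num : (2:Int) ≤ 4), gspec_le4 (by norm_num : (2:Int)+1 ≤ 4), ← Int.mul_emod]
    · rw [gspec_le4 (by norm_num : (3:Int) ≤ 4), gspec_le4 (by norm_num : (3:Int)+1 ≤ 4), ← Int.mul_emod]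
    · have hb0 : b = 0 := by
        by_contra hb0
        exact h ⟨rfl, hb0⟩
      subst hb0
      rw [gspec_le4 (by norm_num : (4:Int) ≤ 4)]
      norm_num
      rw [← Int.mul_emod]
      norm_num

theorem solve_eq_gspec (n : Int) : solve n = gspec n := by
  have hempty : CacheInv PySem.Dict.empty := by
    intro k v hv
    simp [PySem.Dict.get?_empty] at hv
  exact (solveCache_eq n PySem.Dict.empty hempty).1

theorem solve_alt_eq_gspec (n : Int) : solve_alt n = gspec n := by
  rw [solve_alt]
  split
  · rename_i hn
    exact (gspec_le4 hn).symm
  · rename_i hn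
    obtain ⟨i1, i2, i3, i4, i5⟩ := solveLoop_inv n 1 0 (by omega) (by norm_num) (by norm_num)
    rw [final_eq _ _ _ i1 i2 i3 i4, i5]
    norm_num
    exact gspec_emod n (by omega)

-- ===== VERDICT (by name: the statement is the Claim_ definition above) =====
theorem solve_spec : Claim_equal_solve := by
  intro n _
  unfold Spec_solve
  rw [solve_eq_gspec, solve_alt_eq_gspec]
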